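-- pv_equiv track=rewrite | github.com/haesookimDev/Algorithm | 프로그래머스/0/120835. 진료 순서 정하기/진료 순서 정하기.py | solution
-- ===== SOURCE A (Python) =====
-- def solution(emergency):
--     answer = []
--     num_poe = len(emergency)
--
--     for i in emergency:
--         lt = 1
--         for j in emergency:
--             if i<j:
--                 lt+=1
--         answer.append(lt)
--     return answer
-- ===== SOURCE B (Python) =====
-- def solution(emergency):
--     rank = {}
--     for idx, v in enumerate(sorted(emergency, reverse=True)):
--         if v not in rank:
--             rank[v] = idx + 1
--     return [rank[v] for v in emergency]
-- ===== Notes on version B (the rewrite author's own statement) =====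
-- stated objective: faster
-- what changed: Replaces the quadratic nested count-of-larger loops by one descending sort plus a value-to-rank dictionary built from first occurrences, so each element's rank is a single hash lookup.
import Mathlib
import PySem

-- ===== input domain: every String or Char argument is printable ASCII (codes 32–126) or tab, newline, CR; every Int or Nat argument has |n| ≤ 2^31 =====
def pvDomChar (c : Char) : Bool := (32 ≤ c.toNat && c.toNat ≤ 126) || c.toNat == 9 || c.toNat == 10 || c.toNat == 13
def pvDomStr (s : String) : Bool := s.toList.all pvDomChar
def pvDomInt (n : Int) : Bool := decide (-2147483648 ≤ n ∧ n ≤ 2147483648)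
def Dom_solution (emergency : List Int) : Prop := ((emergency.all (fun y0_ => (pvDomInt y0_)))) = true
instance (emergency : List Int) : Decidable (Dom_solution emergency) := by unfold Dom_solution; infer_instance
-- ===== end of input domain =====

-- B replaces A's quadratic nested count-of-larger loops by one descending sort and a
-- value→rank dictionary built from first occurrences (objective: faster, asymptotic).

-- ===== PORT A =====
def solution (emergency : List Int) : List Int :=
  let _num_poe := emergency.length   -- unused, as in the Python
  emergency.foldl (fun answer i =>
    answer ++ [emergency.foldl (fun lt j => if i < j then lt + 1 else lt) (1 : Int)]) []

-- ===== PORT B =====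
-- rank[v] lookup: the key is always present (every element of emergency occurs in the
-- sorted list), so the `.getD 0` default is never used; Python's rank[v] never raises here.
def solution_alt (emergency : List Int) : List Int :=
  let s := PySem.List.sorted emergency (fun x => x) true
  let rank : PySem.Dict Int Int :=
    (PySem.List.enumerate s 0).foldl
      (fun d p => if d.contains p.2 then d else d.insert p.2 (p.1 + 1)) PySem.Dict.empty
  emergency.map (fun v => (PySem.Dict.get? rank v).getD 0)

-- ===== PRECONDITION & SPEC =====
def Spec_solution (emergency : List Int) (out : List Int) : Prop := out = solution_alt emergency
instance (emergency : List Int) (out : List Int) : Decidable (Spec_solution emergency out) := by unfold Spec_solution; infer_instance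

-- ===== CLAIM (what is proved, stated in full; the proofs are below) =====
def Claim_equal_solution : Prop := ∀ (emergency : List Int), Dom_solution emergency → Spec_solution emergency (solution emergency)

-- ===== LEMMAS AND PROOFS =====

-- once the rank of v is recorded, the rest of the dict-building loop never changes it
lemma rank_preserved (v r : Int) (t : List Int) (k : Int) (d : PySem.Dict Int Int)
    (hd : d.get? v = some r) :
    ((PySem.List.enumerate t k).foldl
      (fun d p => if d.contains p.2 then d else d.insert p.2 (p.1 + 1)) d).get? v = some r := by
  induction t generalizing k d with
  | nil => simpa [PySem.List.enumerate_nil] using hd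
  | cons h t ih =>
    rw [PySem.List.enumerate_cons, List.foldl_cons]
    by_cases hvh : v = h
    · subst hvh
      have hc : d.contains v = true := by
        rw [PySem.Dict.contains_eq_isSome_get?, hd]; rfl
      simp only [hc, if_true]
      exact ih _ _ hd
    · by_cases hc : d.contains h
      · simp only [hc, if_true]; exact ih _ _ hd
      · simp only [hc, Bool.false_eq_true, if_false]
        exact ih _ _ (by rw [PySem.Dict.get?_insert_of_ne _ _ hvh, hd])

-- the dict built over a descending list maps v to (start index) + (#elements > v) + 1
lemma rank_getD (s : List Int) (hs : s.Pairwise (fun a b => b ≤ a)) (v : Int) (hv : v ∈ s)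
    (k : Int) (d : PySem.Dict Int Int) (hd : d.get? v = none) :
    ((PySem.List.enumerate s k).foldl
      (fun d p => if d.contains p.2 then d else d.insert p.2 (p.1 + 1)) d).get? v
      = some (k + (s.countP (fun j => v < j) : Int) + 1) := by
  induction s generalizing k d with
  | nil => cases hv
  | cons h t ih =>
    rw [PySem.List.enumerate_cons, List.foldl_cons]
    rw [List.pairwise_cons] at hs
    by_cases hvh : v = h
    · subst hvh
      have hc : d.contains v = false := by
        rw [PySem.Dict.contains_eq_isSome_get?, hd]; rfl
      simp only [hc, Bool.false_eq_true, if_false]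
      have hcount : t.countP (fun j => v < j) = 0 :=
        List.countP_eq_zero.mpr (fun j hj => by
          have := hs.1 j hj; simp; omega)
      have : List.countP (fun j => v < j) (v :: t) = 0 := by
        rw [List.countP_cons, hcount]; simp
      rw [this]
      have := rank_preserved v (k + 1) t (k + 1) (d.insert v (k + 1))
        (PySem.Dict.get?_insert_self _ _ _)
      rw [this]
      norm_num
    · have hvt : v ∈ t := by cases hv with
        | head => exact absurd rfl hvh
        | tail _ h => exact h
      have hlt : v < h := lt_of_le_of_ne (hs.1 v hvt) hvh
      have hstep : ∀ d' : PySem.Dict Int Int, d'.get? v = none →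
          ((if d'.contains h then d' else d'.insert h (k + 1)) : PySem.Dict Int Int).get? v = none := by
        intro d' hd'
        by_cases hc : d'.contains h
        · simp [hc, hd']
        · simp only [hc, Bool.false_eq_true, if_false]
          rw [PySem.Dict.get?_insert_of_ne _ _ hvh, hd']
      rw [ih hs.2 hvt (k + 1) _ (hstep d hd)]
      have : List.countP (fun j => v < j) (h :: t) = List.countP (fun j => v < j) t + 1 := by
        rw [List.countP_cons]; simp [hlt]
      rw [this]
      push_cast
      ring_nf

-- A's inner loop is 1 + count of strictly larger elements
lemma inner_count (emergency : List Int) (i : Int) :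
    emergency.foldl (fun lt j => if i < j then lt + 1 else lt) (1 : Int)
      = 1 + (emergency.countP (fun j => i < j) : Int) :=
  PySem.List.foldl_ite_add_one _ _ _

-- ===== VERDICT (by name: the statement is the Claim_ definition above) =====
theorem solution_spec : Claim_equal_solution := by
  intro emergency _
  unfold Spec_solution solution solution_alt
  simp only []
  rw [PySem.List.foldl_append_singleton_eq_map, List.nil_append]
  apply List.map_congr_left
  intro v hv
  have hperm := PySem.List.sorted_perm emergency (fun x => x) true
  have hvs : v ∈ PySem.List.sorted emergency (fun x => x) true := hperm.mem_iff.mpr hv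
  have hpw : (PySem.List.sorted emergency (fun x => x) true).Pairwise (fun a b => b ≤ a) :=
    PySem.List.sorted_pairwise_rev emergency (fun x => x)
  rw [inner_count, rank_getD _ hpw v hvs 0 PySem.Dict.empty (PySem.Dict.get?_empty _)]
  rw [hperm.countP_eq]
  simp [Option.getD]
  ring
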